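-- pv_equiv track=rewrite | github.com/Racso1624/Lab2-Cifrado | conversion.py | text_to_base64
-- ===== SOURCE A (Python) =====
-- def text_to_bits(text):
--
--     result_bits = ""
--     for letter in text:
--         bits = bin(ord(letter))[2:].zfill(8)
--         result_bits += bits
--     return result_bits
--
-- def text_to_base64(text):
--
--     base64_alphabet = "ABCDEFGHIJKLMNOPQRSTUVWXYZabcdefghijklmnopqrstuvwxyz0123456789+/"
--
--     bits = text_to_bits(text)
--     while len(bits) % 6 != 0:
--         bits += '0'
--
--     result_base64 = ""
--     for i in range(0, len(bits), 6):
--         bit_group = bits[i:i+6]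
--         value = int(bit_group, 2)
--         result_base64 += base64_alphabet[value]
--     return result_base64
-- ===== SOURCE B (Python) =====
-- def text_to_base64(text):
--     base64_alphabet = "ABCDEFGHIJKLMNOPQRSTUVWXYZabcdefghijklmnopqrstuvwxyz0123456789+/"
--     out = []
--     acc = 0
--     count = 0
--     for ch in text:
--         acc = (acc << 8) | ord(ch)
--         count += 8
--         while count >= 6:
--             count -= 6
--             out.append(base64_alphabet[(acc >> count) & 0x3F])
--         acc &= (1 << count) - 1
--     if count:
--         out.append(base64_alphabet[(acc << (6 - count)) & 0x3F])
--     return "".join(out)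
-- ===== Notes on version B (the rewrite author's own statement) =====
-- stated objective: faster
-- what changed: Replaced the two-phase design (build the whole bit string by repeated concatenation, zero-pad it, then slice and int()-decode every 6 characters) by a standard single-pass streaming encoder: a bit accumulator and a pending-bit count, shifting in 8 bits per character and emitting one alphabet character whenever 6 bits are available, plus one final zero-padded character; no bit string is ever materialized and no slicing is used. The streaming accumulator avoids A's quadratic-prone string concatenations and per-chunk slicing/int() parsing, working on small integers instead.
import Mathlib
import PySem

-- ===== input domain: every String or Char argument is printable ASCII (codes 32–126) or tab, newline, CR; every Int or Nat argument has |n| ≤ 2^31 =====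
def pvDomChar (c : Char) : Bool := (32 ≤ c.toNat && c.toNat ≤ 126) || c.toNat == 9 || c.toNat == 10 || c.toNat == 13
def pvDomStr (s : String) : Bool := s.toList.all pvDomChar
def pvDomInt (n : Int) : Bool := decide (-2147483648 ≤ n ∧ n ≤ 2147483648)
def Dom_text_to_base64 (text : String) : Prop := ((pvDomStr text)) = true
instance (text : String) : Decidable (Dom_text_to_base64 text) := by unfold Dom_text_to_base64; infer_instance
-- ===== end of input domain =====

-- B replaces A's build-full-bit-string-then-slice-every-6 design by a standard single-pass streaming
-- bit accumulator that emits a base64 digit whenever 6 bits are available (objective: alternative algorithm, one pass, no bit string).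

-- ===== PORT A =====
def pvAlphaA : List Char := "ABCDEFGHIJKLMNOPQRSTUVWXYZabcdefghijklmnopqrstuvwxyz0123456789+/".toList

-- helper text_to_bits: result_bits += bin(ord(letter))[2:].zfill(8)
def text_to_bits (text : String) : List Char :=
  text.toList.foldl (fun result_bits letter =>
    result_bits ++ PySem.Chars.zfill (PySem.List.slice (PySem.Int.toBinChars0b (letter.toNat : Int)) (some 2) none) 8) []

-- while len(bits) % 6 != 0: bits += '0'  (fuel makes the loop structural: at most 5 zeros are ever appended)
def pvPadAGo : Nat → List Char → List Char
| 0, bits => bits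
| fuel + 1, bits => if bits.length % 6 ≠ 0 then pvPadAGo fuel (bits ++ ['0']) else bits

def pvPadA (bits : List Char) : List Char := pvPadAGo 5 bits

def text_to_base64 (text : String) : String :=
  let bits := pvPadA (text_to_bits text)
  String.ofList ((PySem.List.pyRange 0 (PySem.List.len bits) 6).foldl (fun result_base64 i =>
    let bit_group := PySem.List.slice bits (some i) (some (i + 6))
    -- int(bit_group, 2): bit_group is always a nonempty string of binary digits, so ofCharsBase? is `some`; .getD 0 unreachable
    let value := (PySem.Int.ofCharsBase? bit_group 2).getD 0
    -- base64_alphabet[value]: value < 64 always, so pyGet? is `some`; .getD ' ' unreachable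
    result_base64 ++ [(PySem.List.pyGet? pvAlphaA value).getD ' ']) [])

-- ===== PORT B =====
def pvAlphaB : List Char := "ABCDEFGHIJKLMNOPQRSTUVWXYZabcdefghijklmnopqrstuvwxyz0123456789+/".toList

-- Python's acc/count are nonnegative ints throughout, so Nat's <<< >>> ||| &&& are exact for Python's shifts/or/and.
-- while count >= 6: count -= 6; out.append(alphabet[(acc >> count) & 0x3F])
-- (fuel = count makes the while loop structural; each iteration consumes 6 of count)
def pvEmitBGo : Nat → Nat → Nat → List Char → List Char × Nat
| 0, _, count, out => (out, count)
| fuel + 1, acc, count, out =>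
  if 6 ≤ count then
    pvEmitBGo fuel acc (count - 6) (out ++ [(PySem.List.pyGet? pvAlphaB (((acc >>> (count - 6)) &&& 63 : Nat) : Int)).getD ' '])
  else (out, count)

def pvEmitB (acc : Nat) (count : Nat) (out : List Char) : List Char × Nat := pvEmitBGo count acc count out

-- loop body: acc = (acc << 8) | ord(ch); count += 8; inner while; acc &= (1 << count) - 1
def pvStepB (st : Nat × Nat × List Char) (ch : Char) : Nat × Nat × List Char :=
  let acc := st.1 <<< 8 ||| ch.toNat
  let count := st.2.1 + 8
  let r := pvEmitB acc count st.2.2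
  (acc &&& (1 <<< r.2 - 1), r.2, r.1)

def text_to_base64_alt (text : String) : String :=
  let st := text.toList.foldl pvStepB (0, 0, [])
  String.ofList (if 0 < st.2.1 then
      st.2.2 ++ [(PySem.List.pyGet? pvAlphaB (((st.1 <<< (6 - st.2.1)) &&& 63 : Nat) : Int)).getD ' ']
    else st.2.2)

-- ===== PRECONDITION & SPEC =====
def Spec_text_to_base64 (text : String) (out : String) : Prop := out = text_to_base64_alt text
instance (text : String) (out : String) : Decidable (Spec_text_to_base64 text out) := by unfold Spec_text_to_base64; infer_instance

-- ===== CLAIM (what is proved, stated in full; the proofs are below) =====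
def Claim_equal_text_to_base64 : Prop := ∀ (text : String), Dom_text_to_base64 text → Spec_text_to_base64 text (text_to_base64 text)

-- ===== LEMMAS AND PROOFS =====

-- bit-op ↔ arithmetic bridges used to reason about B's accumulator
theorem shr_and63 (a k : Nat) : a >>> k &&& 63 = a / 2 ^ k % 64 := by
  rw [Nat.shiftRight_eq_div_pow, show (63 : Nat) = 2 ^ 6 - 1 from rfl, Nat.and_two_pow_sub_one_eq_mod]

theorem and_mask (a k : Nat) : a &&& (1 <<< k - 1) = a % 2 ^ k := by
  rw [Nat.one_shiftLeft, Nat.and_two_pow_sub_one_eq_mod]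

theorem shl_or (a n : Nat) (h : n < 256) : a <<< 8 ||| n = a * 2 ^ 8 + n := by
  rw [Nat.shiftLeft_eq, mul_comm, ← Nat.two_pow_add_eq_or_of_lt h, mul_comm]

theorem shl_and63 (a k : Nat) : a <<< k &&& 63 = a * 2 ^ k % 64 := by
  rw [Nat.shiftLeft_eq, show (63 : Nat) = 2 ^ 6 - 1 from rfl, Nat.and_two_pow_sub_one_eq_mod]

-- the k low bits of n, most-significant first
def padBits : Nat → Nat → List Char
| 0, _ => []
| k+1, n => padBits k (n / 2) ++ [if n % 2 = 1 then '1' else '0']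

def binVal (bs : List Char) : Nat := bs.foldl (fun a c => 2 * a + (if c = '1' then 1 else 0)) 0

def dchar (v : Nat) : Char := (PySem.List.pyGet? pvAlphaB (v : Int)).getD ' '

def encCk : Nat → List Char → List Char
| 0, _ => []
| k+1, bs => dchar (binVal (bs.take 6)) :: encCk k (bs.drop 6)

def padTo6 (bs : List Char) : List Char := bs ++ List.replicate ((6 - bs.length % 6) % 6) '0'

def encFinal (bs : List Char) : List Char := encCk ((bs.length + 5) / 6) (padTo6 bs)

def bitsOf (cs : List Char) : List Char := cs.flatMap (fun c => padBits 8 c.toNat)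

def isBin (bs : List Char) : Prop := ∀ c ∈ bs, c = '0' ∨ c = '1'

theorem length_padBits (k n : Nat) : (padBits k n).length = k := by
  induction k generalizing n with
  | zero => simp [padBits]
  | succ k ih => simp [padBits, ih]

theorem isBin_padBits (k n : Nat) : isBin (padBits k n) := by
  induction k generalizing n with
  | zero => intro c hc; simp [padBits] at hc
  | succ k ih =>
    intro c hc
    simp only [padBits, List.mem_append, List.mem_singleton] at hc
    rcases hc with h | h
    · exact ih _ c h
    · subst h; split_ifs <;> simp

theorem binVal_go (ys : List Char) (a : Nat) :
    ys.foldl (fun a c => 2 * a + (if c = '1' then 1 else 0)) a = a * 2 ^ ys.length + binVal ys := by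
  induction ys generalizing a with
  | nil => simp [binVal]
  | cons c ys ih =>
    simp only [List.foldl_cons, List.length_cons, binVal]
    rw [ih, ih]
    ring

theorem binVal_append (xs ys : List Char) :
    binVal (xs ++ ys) = binVal xs * 2 ^ ys.length + binVal ys := by
  have h := binVal_go ys (binVal xs)
  simpa [binVal, List.foldl_append] using h

theorem binVal_replicate_zero (m : Nat) : binVal (List.replicate m '0') = 0 := by
  induction m with
  | zero => rfl
  | succ m ih => simpa [binVal, List.replicate_succ, List.foldl_cons] using ih

theorem binVal_padBits (k n : Nat) : binVal (padBits k n) = n % 2 ^ k := by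
  induction k generalizing n with
  | zero => simp [padBits, binVal, Nat.mod_one]
  | succ k ih =>
    rw [padBits, binVal_append, ih]
    have h := @Nat.mod_mul 2 (2 ^ k) n
    have h2 : (2 : Nat) ^ (k + 1) = 2 * 2 ^ k := by ring
    have h3 : n % 2 < 2 := Nat.mod_lt _ (by omega)
    simp only [List.length_singleton, pow_one]
    rw [h2]
    split_ifs with hb
    · have : binVal ['1'] = 1 := by simp [binVal]
      rw [this]; omega
    · have : binVal ['0'] = 0 := by simp [binVal]
      rw [this]; omega

theorem padBits_split (a b n : Nat) : padBits (a + b) n = padBits a (n / 2 ^ b) ++ padBits b n := by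
  induction b generalizing n with
  | zero => simp [padBits]
  | succ b ih =>
    have : a + (b + 1) = (a + b) + 1 := by omega
    rw [this, padBits, ih, padBits, List.append_assoc, Nat.div_div_eq_div_mul]
    have h2 : (2 : Nat) * 2 ^ b = 2 ^ (b + 1) := by ring
    rw [h2]

theorem padBits_congr (k n m : Nat) (h : n % 2 ^ k = m % 2 ^ k) : padBits k n = padBits k m := by
  induction k generalizing n m with
  | zero => rfl
  | succ k ih =>
    have h1 := @Nat.mod_mul 2 (2 ^ k) n
    have h2 := @Nat.mod_mul 2 (2 ^ k) m
    have hp : (2 : Nat) ^ (k + 1) = 2 * 2 ^ k := by ring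
    rw [hp] at h
    have hn2 : n % 2 < 2 := Nat.mod_lt _ (by omega)
    have hm2 : m % 2 < 2 := Nat.mod_lt _ (by omega)
    have e1 : n % 2 = m % 2 := by omega
    have e2 : n / 2 % 2 ^ k = m / 2 % 2 ^ k := by omega
    rw [padBits, padBits, ih _ _ e2, e1]

theorem binVal_lt (bs : List Char) (h : isBin bs) : binVal bs < 2 ^ bs.length := by
  induction bs using List.reverseRecOn with
  | nil => simp [binVal]
  | append_singleton xs c ih =>
    have hx : isBin xs := fun d hd => h d (List.mem_append_left _ hd)
    have hc : c = '0' ∨ c = '1' := h c (List.mem_append_right _ (List.mem_singleton_self c))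
    have hb := binVal_append xs [c]
    have hcv : binVal [c] ≤ 1 := by rcases hc with rfl | rfl <;> simp [binVal]
    have := ih hx
    simp only [List.length_append, List.length_singleton, pow_one, pow_succ] at *
    omega

theorem padBits_binVal (bs : List Char) (h : isBin bs) : padBits bs.length (binVal bs) = bs := by
  induction bs using List.reverseRecOn with
  | nil => rfl
  | append_singleton xs c ih =>
    have hx : isBin xs := fun d hd => h d (List.mem_append_left _ hd)
    have hc : c = '0' ∨ c = '1' := h c (List.mem_append_right _ (List.mem_singleton_self c))
    have hb := binVal_append xs [c]
    simp only [List.length_singleton, pow_one] at hb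
    have hc0 : binVal ['0'] = 0 := by simp [binVal]
    have hc1 : binVal ['1'] = 1 := by simp [binVal]
    simp only [List.length_append, List.length_singleton]
    rw [padBits]
    have hdiv : binVal (xs ++ [c]) / 2 = binVal xs := by
      rcases hc with rfl | rfl <;> rw [hb] <;> simp [hc0, hc1] <;> omega
    have hmod : binVal (xs ++ [c]) % 2 = if c = '1' then 1 else 0 := by
      rcases hc with rfl | rfl <;> rw [hb] <;> simp [hc0, hc1] <;> omega
    rw [hdiv, ih hx, hmod]
    rcases hc with rfl | rfl <;> simp

set_option maxRecDepth 100000 in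
theorem dec64 : ∀ v : Nat, v < 64 →
    (PySem.List.pyGet? pvAlphaA (((PySem.Int.ofCharsBase? (padBits 6 v) 2).getD 0))).getD ' ' = dchar v := by
  decide

theorem padBits_zero (k : Nat) : padBits k 0 = List.replicate k '0' := by
  induction k with
  | zero => rfl
  | succ k ih => rw [padBits, ih]; simp [List.replicate_succ']

theorem toDigitsCore_two (fuel : Nat) : ∀ (n : Nat) (ds : List Char), 0 < n → n ≤ fuel →
    Nat.toDigitsCore 2 fuel n ds = padBits (Nat.log2 n + 1) n ++ ds := by
  induction fuel with
  | zero => intro n ds h1 h2; omega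
  | succ f ih =>
    intro n ds h1 h2
    rw [Nat.toDigitsCore.eq_def]
    simp only []
    by_cases h0 : n / 2 = 0
    · have hn1 : n = 1 := by omega
      subst hn1
      norm_num [Nat.log2, padBits]
      decide
    · rw [if_neg h0, ih (n / 2) _ (by omega) (by omega)]
      have hlog : Nat.log2 n = Nat.log2 (n / 2) + 1 := by
        rw [Nat.log2_def]
        have : 2 ≤ n := by omega
        simp [this]
      rw [hlog]
      have hpb : padBits (Nat.log2 (n / 2) + 1 + 1) n
          = padBits (Nat.log2 (n / 2) + 1) (n / 2) ++ [if n % 2 = 1 then '1' else '0'] := by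
        rw [padBits]
      rw [hpb, List.append_assoc]
      have hd : Nat.digitChar (n % 2) = if n % 2 = 1 then '1' else '0' := by
        have : n % 2 = 0 ∨ n % 2 = 1 := by omega
        rcases this with h | h <;> rw [h] <;> rfl
      rw [hd]
      rfl

theorem toDigits_two (n : Nat) :
    Nat.toDigits 2 n = padBits (if n = 0 then 1 else Nat.log2 n + 1) n := by
  by_cases h : n = 0
  · subst h; rfl
  · rw [Nat.toDigits, toDigitsCore_two (n + 1) n [] (by omega) (by omega), if_neg h]
    simp

theorem byteA : ∀ n : Nat, n < 256 →
    PySem.Chars.zfill (PySem.List.slice (PySem.Int.toBinChars0b (n : Int)) (some 2) none) 8 = padBits 8 n := by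
  intro n h
  have hnn : ¬ ((n : Int) < 0) := by omega
  rw [PySem.Int.toBinChars0b, if_neg hnn]
  have hslice : PySem.List.slice ('0' :: 'b' :: Nat.toDigits 2 ((n : Int)).toNat) (some 2) none
      = Nat.toDigits 2 ((n : Int)).toNat := by
    simpa using PySem.List.slice_from ('0' :: 'b' :: Nat.toDigits 2 ((n : Int)).toNat) (a := 2) (by norm_num)
  rw [hslice]
  simp only [Int.toNat_natCast]
  rw [toDigits_two]
  set L := if n = 0 then 1 else Nat.log2 n + 1 with hL
  have hL1 : 1 ≤ L := by rw [hL]; split <;> omega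
  have hL8 : L ≤ 8 := by
    rw [hL]; split
    · omega
    · have : Nat.log2 n < 8 := (Nat.log2_lt (by assumption)).mpr (by omega)
      omega
  have hlt : n < 2 ^ L := by
    rw [hL]; split
    · omega
    · exact Nat.lt_log2_self
  have hsplit : padBits 8 n = List.replicate (8 - L) '0' ++ padBits L n := by
    conv_lhs => rw [show 8 = (8 - L) + L from by omega]
    rw [padBits_split]
    rw [Nat.div_eq_of_lt hlt, padBits_zero]
  have hne : padBits L n ≠ [] := by
    intro hnil
    have := length_padBits L n
    rw [hnil] at this
    simp at this
    omega
  obtain ⟨c, rest, hcr⟩ := List.exists_cons_of_ne_nil hne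
  have hc : c = '0' ∨ c = '1' := isBin_padBits L n c (by rw [hcr]; exact List.mem_cons_self)
  have hlen : (c :: rest).length = L := by rw [← hcr, length_padBits]
  rw [hsplit, hcr, PySem.Chars.zfill]
  split_ifs with h1 h2
  · rw [hlen] at h1
    have : L = 8 := by omega
    rw [this]
    simp
  · rcases hc with rfl | rfl <;> simp_all
  · have h8 : (8 : Int).toNat = 8 := rfl
    rw [h8, hlen]

theorem bits_eq (text : String) (h : ∀ c ∈ text.toList, c.toNat < 256) :
    text_to_bits text = bitsOf text.toList := by
  unfold text_to_bits bitsOf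
  rw [PySem.List.foldl_congr_mem text.toList _ (fun res c => res ++ padBits 8 c.toNat) []
    (fun acc c hc => by rw [byteA c.toNat (h c hc)])]
  simpa using PySem.List.foldl_append_eq_flatMap (fun c => padBits 8 c.toNat) text.toList []

theorem padAGo_eq (f : Nat) : ∀ l : List Char, (6 - l.length % 6) % 6 ≤ f → pvPadAGo f l = padTo6 l := by
  induction f with
  | zero =>
    intro l h
    have h0 : l.length % 6 = 0 := by omega
    have hz : (6 - l.length % 6) % 6 = 0 := by omega
    simp [pvPadAGo, padTo6, hz]
  | succ f ih =>
    intro l h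
    rw [pvPadAGo]
    split_ifs with hne
    · rw [ih (l ++ ['0']) (by simp only [List.length_append, List.length_cons, List.length_nil]; omega)]
      unfold padTo6
      have hm : (6 - l.length % 6) % 6 = (6 - (l ++ ['0']).length % 6) % 6 + 1 := by
        simp only [List.length_append, List.length_cons, List.length_nil]
        omega
      rw [hm, List.replicate_succ, List.append_assoc]
      rfl
    · unfold padTo6
      have h0 : (6 - l.length % 6) % 6 = 0 := by omega
      simp [h0]

theorem padA_eq (l : List Char) : pvPadA l = padTo6 l :=
  padAGo_eq 5 l (by omega)

theorem encCk_append (q k : Nat) (X Y : List Char) (h : X.length = 6 * q) :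
    encCk (q + k) (X ++ Y) = encCk q X ++ encCk k Y := by
  induction q generalizing X with
  | zero =>
    have : X = [] := by
      have : X.length = 0 := by omega
      exact List.length_eq_zero_iff.mp this
    subst this; simp [encCk]
  | succ q ih =>
    have hq : q + 1 + k = (q + k) + 1 := by omega
    rw [hq]
    simp only [encCk]
    rw [List.take_append_of_le_length (by omega), List.drop_append_of_le_length (by omega)]
    rw [ih (X.drop 6) (by simp [h]; omega)]
    simp

theorem encFinal_split (X Y : List Char) (h : X.length % 6 = 0) :
    encFinal (X ++ Y) = encCk (X.length / 6) X ++ encFinal Y := by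
  unfold encFinal padTo6
  simp only [List.length_append]
  have hm : (6 - (X.length + Y.length) % 6) % 6 = (6 - Y.length % 6) % 6 := by omega
  have hk : (X.length + Y.length + 5) / 6 = X.length / 6 + (Y.length + 5) / 6 := by omega
  rw [hm, hk, List.append_assoc, encCk_append (X.length / 6) _ X _ (by omega)]

theorem loopA_core (k : Nat) : ∀ (bs : List Char) (out : List Char), isBin bs → bs.length = 6 * k →
    (List.range k).foldl (fun res j => res ++ [dchar (binVal ((bs.drop (6 * j)).take 6))]) out
      = out ++ encCk k bs := by
  induction k with
  | zero => intro bs out _ h; simp [encCk]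
  | succ k ih =>
    intro bs out hB hl
    rw [List.range_succ_eq_map]
    simp only [List.foldl_cons, List.foldl_map]
    rw [PySem.List.foldl_congr_mem (List.range k) _
      (fun res j => res ++ [dchar (binVal (((bs.drop 6).drop (6 * j)).take 6))]) _
      (fun acc j hj => by
        simp only []
        rw [List.drop_drop]
        have hjs : 6 * j.succ = 6 + 6 * j := by omega
        rw [hjs])]
    rw [ih (bs.drop 6) _ (fun c hc => hB c (List.mem_of_mem_drop hc)) (by simp only [List.length_drop, hl]; omega)]
    simp only [Nat.mul_zero, List.drop_zero, encCk]
    simp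

theorem loopA_eq (bs out : List Char) (h : isBin bs) (hl : bs.length % 6 = 0) :
    (PySem.List.pyRange 0 (PySem.List.len bs) 6).foldl (fun result_base64 i =>
      result_base64 ++ [(PySem.List.pyGet? pvAlphaA
        ((PySem.Int.ofCharsBase? (PySem.List.slice bs (some i) (some (i + 6))) 2).getD 0)).getD ' ']) out
      = out ++ encCk (bs.length / 6) bs := by
  set k := bs.length / 6 with hk
  have hlen : bs.length = 6 * k := by omega
  rw [PySem.List.pyRange_of_pos 0 (PySem.List.len bs) (by norm_num)]
  have hcnt : (if (0 : Int) < PySem.List.len bs then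
      ((PySem.List.len bs - 0 + 6 - 1) / 6).toNat else 0) = k := by
    simp only [PySem.List.len_eq]
    split_ifs with hpos
    · omega
    · omega
  rw [hcnt, List.foldl_map]
  rw [PySem.List.foldl_congr_mem (List.range k) _
    (fun res j => res ++ [dchar (binVal ((bs.drop (6 * j)).take 6))]) out ?_]
  · exact loopA_core k bs out h hlen
  · intro acc j hj
    have hjk : j < k := List.mem_range.mp hj
    simp only []
    have hcast1 : (0 : Int) + 6 * (j : Int) = ((6 * j : Nat) : Int) := by push_cast; ring
    have hcast2 : ((6 * j : Nat) : Int) + 6 = ((6 * j + 6 : Nat) : Int) := by push_cast; ring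
    rw [hcast1, hcast2, PySem.List.slice_natCast]
    have htk : 6 * j + 6 - 6 * j = 6 := by omega
    rw [htk]
    set chunk := (bs.drop (6 * j)).take 6 with hchunk
    have hclen : chunk.length = 6 := by
      simp [hchunk]; omega
    have hcbin : isBin chunk := fun c hc =>
      h c (List.mem_of_mem_drop (List.mem_of_mem_take hc))
    have hlt : binVal chunk < 64 := by
      have := binVal_lt chunk hcbin
      rw [hclen] at this
      norm_num at this
      exact this
    have hrec : chunk = padBits 6 (binVal chunk) := by
      conv_lhs => rw [← padBits_binVal chunk hcbin]
      rw [hclen]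
    congr 2
    conv_lhs => rw [hrec]
    exact dec64 (binVal chunk) hlt

def finishB (st : Nat × Nat × List Char) : List Char :=
  if 0 < st.2.1 then st.2.2 ++ [dchar (st.1 * 2 ^ (6 - st.2.1) % 64)] else st.2.2

theorem emitBGo_spec (f : Nat) : ∀ (count acc : Nat) (out : List Char), count / 6 ≤ f →
    pvEmitBGo f acc count out = (out ++ encCk (count / 6) (padBits count acc), count % 6) := by
  induction f with
  | zero =>
    intro count acc out h
    have h0 : count / 6 = 0 := by omega
    have h1 : count % 6 = count := by omega
    simp [pvEmitBGo, h0, h1, encCk]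
  | succ f ih =>
    intro count acc out h
    rw [pvEmitBGo]
    split_ifs with h6
    · rw [ih (count - 6) acc _ (by omega)]
      have hq : count / 6 = (count - 6) / 6 + 1 := by omega
      have hsplit : padBits count acc = padBits 6 (acc / 2 ^ (count - 6)) ++ padBits (count - 6) acc := by
        conv_lhs => rw [show count = 6 + (count - 6) from by omega]
        exact padBits_split 6 (count - 6) acc
      rw [hq, hsplit]
      simp only [encCk]
      rw [List.take_append_of_le_length (by simp [length_padBits]),
          List.drop_append_of_le_length (by simp [length_padBits]),
          List.take_of_length_le (by simp [length_padBits]),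
          List.drop_of_length_le (by simp [length_padBits])]
      simp only [List.nil_append]
      rw [binVal_padBits, shr_and63]
      have hmod : count % 6 = (count - 6) % 6 := by omega
      have h64 : (2 : Nat) ^ 6 = 64 := by norm_num
      rw [h64, hmod]
      simp [dchar, List.append_assoc]
    · have h0 : count / 6 = 0 := by omega
      have h1 : count % 6 = count := by omega
      simp [h0, h1, encCk]

theorem emitB_spec (count : Nat) : ∀ (acc : Nat) (out : List Char),
    pvEmitB acc count out = (out ++ encCk (count / 6) (padBits count acc), count % 6) := by
  intro acc out
  exact emitBGo_spec count count acc out (by omega)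

theorem B_inv (cs : List Char) : ∀ (acc count : Nat) (out : List Char),
    (∀ c ∈ cs, c.toNat < 256) → count < 6 →
    finishB (cs.foldl pvStepB (acc, count, out)) = out ++ encFinal (padBits count acc ++ bitsOf cs) := by
  induction cs with
  | nil =>
    intro acc count out _ hc
    simp only [List.foldl_nil, bitsOf, List.flatMap_nil, List.append_nil]
    unfold finishB encFinal padTo6
    simp only [length_padBits]
    by_cases h0 : 0 < count
    · have hone : (count + 5) / 6 = 1 := by omega
      have hpad : (6 - count % 6) % 6 = 6 - count := by omega
      rw [hone, hpad]
      simp only [encCk, if_pos h0]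
      rw [List.take_of_length_le (by simp [length_padBits]; omega)]
      rw [binVal_append, binVal_padBits, binVal_replicate_zero, List.length_replicate]
      have h64 : acc * 2 ^ (6 - count) % 64 = acc % 2 ^ count * 2 ^ (6 - count) := by
        have : (64 : Nat) = 2 ^ count * 2 ^ (6 - count) := by
          have hc6 : count + (6 - count) = 6 := by omega
          rw [← pow_add, hc6]
          norm_num
        rw [this]
        exact Nat.mul_mod_mul_right _ _ _
      rw [h64]
      simp
    · have hc0 : count = 0 := by omega
      subst hc0
      simp [encCk, padBits]
  | cons c cs ih =>
    intro acc count out hB hc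
    have hn : c.toNat < 256 := hB c List.mem_cons_self
    have hstep : pvStepB (acc, count, out) c =
        ((acc * 2 ^ 8 + c.toNat) % 2 ^ ((count + 8) % 6), (count + 8) % 6,
         out ++ encCk ((count + 8) / 6) (padBits (count + 8) (acc * 2 ^ 8 + c.toNat))) := by
      simp only [pvStepB, shl_or acc c.toNat hn, emitB_spec, and_mask]
    simp only [List.foldl_cons, hstep]
    rw [ih _ _ _ (fun d hd => hB d (List.mem_cons_of_mem c hd)) (by omega)]
    set acc' := acc * 2 ^ 8 + c.toNat with hacc'
    set r := (count + 8) % 6 with hr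
    have htrunc : padBits r (acc' % 2 ^ r) = padBits r acc' :=
      padBits_congr r _ _ (Nat.mod_mod_of_dvd _ dvd_rfl)
    rw [htrunc]
    have hbits : bitsOf (c :: cs) = padBits 8 c.toNat ++ bitsOf cs := by
      simp [bitsOf]
    have hmerge : padBits count acc ++ padBits 8 c.toNat = padBits (count + 8) acc' := by
      rw [padBits_split count 8 acc']
      congr 1
      · congr 1
        have : (2 : Nat) ^ 8 = 256 := by norm_num
        rw [this]
        omega
      · apply padBits_congr
        have h8 : (2 : Nat) ^ 8 = 256 := by norm_num
        rw [h8]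
        omega
    have hXR : padBits (count + 8) acc' =
        padBits (count + 8 - r) (acc' / 2 ^ r) ++ padBits r acc' := by
      conv_lhs => rw [show count + 8 = (count + 8 - r) + r from by omega]
      exact padBits_split _ r acc'
    have hX : (padBits (count + 8 - r) (acc' / 2 ^ r)).length = 6 * ((count + 8) / 6) := by
      rw [length_padBits]; omega
    have hright : encFinal (padBits count acc ++ bitsOf (c :: cs))
        = encCk ((count + 8) / 6) (padBits (count + 8 - r) (acc' / 2 ^ r))
          ++ encFinal (padBits r acc' ++ bitsOf cs) := by
      rw [hbits, ← List.append_assoc, hmerge, hXR, List.append_assoc,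
        encFinal_split (padBits (count + 8 - r) (acc' / 2 ^ r)) (padBits r acc' ++ bitsOf cs)
          (by rw [length_padBits]; omega)]
      rw [length_padBits]
      have hdq : (count + 8 - r) / 6 = (count + 8) / 6 := by omega
      rw [hdq]
    have hE : encCk ((count + 8) / 6) (padBits (count + 8) acc')
        = encCk ((count + 8) / 6) (padBits (count + 8 - r) (acc' / 2 ^ r)) := by
      have h0 := encCk_append ((count + 8) / 6) 0
        (padBits (count + 8 - r) (acc' / 2 ^ r)) (padBits r acc') hX
      rw [← hXR] at h0
      simpa [encCk] using h0
    rw [hright, hE]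
    simp [List.append_assoc]

theorem A_norm (text : String) (h : ∀ c ∈ text.toList, c.toNat < 256) :
    text_to_base64 text = String.ofList (encFinal (bitsOf text.toList)) := by
  simp only [text_to_base64]
  rw [bits_eq text h, padA_eq]
  set B0 := bitsOf text.toList with hB0
  have hbin : isBin (padTo6 B0) := by
    intro d hd
    simp only [padTo6, List.mem_append] at hd
    rcases hd with hd | hd
    · simp only [hB0, bitsOf, List.mem_flatMap] at hd
      obtain ⟨c, _, hdc⟩ := hd
      exact isBin_padBits 8 c.toNat d hdc
    · left; exact (List.eq_of_mem_replicate hd)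
  have hmod : (padTo6 B0).length % 6 = 0 := by
    simp [padTo6]; omega
  rw [loopA_eq (padTo6 B0) [] hbin hmod]
  have hk : (padTo6 B0).length / 6 = (B0.length + 5) / 6 := by
    simp [padTo6]; omega
  rw [List.nil_append, hk]
  rfl

theorem B_norm (text : String) (h : ∀ c ∈ text.toList, c.toNat < 256) :
    text_to_base64_alt text = String.ofList (encFinal (bitsOf text.toList)) := by
  simp only [text_to_base64_alt, shl_and63]
  have hinv := B_inv text.toList 0 0 [] h (by omega)
  simp only [finishB, dchar, padBits, List.nil_append] at hinv
  rw [hinv]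

theorem dom_chars (text : String) (hd : Dom_text_to_base64 text) : ∀ c ∈ text.toList, c.toNat < 256 := by
  intro c hc
  unfold Dom_text_to_base64 pvDomStr at hd
  rw [List.all_eq_true] at hd
  have := hd c hc
  simp only [pvDomChar, Bool.or_eq_true, Bool.and_eq_true, decide_eq_true_eq, beq_iff_eq] at this
  omega

-- ===== VERDICT (by name: the statement is the Claim_ definition above) =====
theorem text_to_base64_spec : Claim_equal_text_to_base64 := by
  intro text hd
  unfold Spec_text_to_base64
  rw [A_norm text (dom_chars text hd), B_norm text (dom_chars text hd)]
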